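-- pv_equiv track=rewrite | github.com/i-machine-things/JobDocs | .github/scripts/sanitize_review.py | _strip_blockquote_prefix
-- ===== SOURCE A (Python) =====
-- def _strip_blockquote_prefix(line: str) -> tuple[str, str]:
--     """Return (prefix, content) after stripping leading '> ' or '>' markers."""
--     prefix = ""
--     content = line
--     while True:
--         if content.startswith("> "):
--             prefix += "> "
--             content = content[2:]
--         elif content.startswith(">"):
--             prefix += ">"
--             content = content[1:]
--         else:
--             break
--     return prefix, content
-- ===== SOURCE B (Python) =====
-- def _strip_blockquote_prefix(line: str) -> tuple[str, str]:
--     """Return (prefix, content) after stripping leading '> ' or '>' markers."""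
--     pos = 0
--     n = len(line)
--     while pos < n and line[pos] == '>':
--         pos += 1
--         if pos < n and line[pos] == ' ':
--             pos += 1
--     return line[:pos], line[pos:]
-- ===== Notes on version B (the rewrite author's own statement) =====
-- stated objective: simpler
-- what changed: B computes the split index with a single index pointer over the original string (consume '>' then an optional ' ') and slices once at the end, instead of A's loop that repeatedly re-slices the content and accumulates a growing prefix string.
import Mathlib
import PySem

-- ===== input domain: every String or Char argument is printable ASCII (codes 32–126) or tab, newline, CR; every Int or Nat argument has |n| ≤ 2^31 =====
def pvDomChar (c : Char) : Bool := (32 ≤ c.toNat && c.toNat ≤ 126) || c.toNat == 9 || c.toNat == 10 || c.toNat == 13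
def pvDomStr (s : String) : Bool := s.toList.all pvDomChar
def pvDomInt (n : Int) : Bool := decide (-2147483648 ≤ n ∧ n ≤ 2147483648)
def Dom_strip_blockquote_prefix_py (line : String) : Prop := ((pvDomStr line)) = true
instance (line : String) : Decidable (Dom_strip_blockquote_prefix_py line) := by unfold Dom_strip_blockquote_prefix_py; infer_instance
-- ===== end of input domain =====

-- B computes the split index with one pointer (consume '>' then an optional ' ') and slices once,
-- instead of A's loop that re-slices the content and grows a prefix string each iteration (objective: simpler).

-- ===== PORT A =====
-- A's while-loop: state (prefix, content); branch order "> " then ">" as in the Python.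
def pvALoop : List Char → List Char → List Char × List Char
  | pref, '>' :: ' ' :: rest => pvALoop (pref ++ ['>', ' ']) rest
  | pref, '>' :: rest => pvALoop (pref ++ ['>']) rest
  | pref, content => (pref, content)

def strip_blockquote_prefix_py (line : String) : String × String :=
  let r := pvALoop [] line.toList
  (String.mk r.1, String.mk r.2)

-- ===== PORT B =====
-- B's while-loop computing only the split position: advance past '>' and an optional following ' '.
def pvBLen : List Char → Nat
  | '>' :: ' ' :: rest => pvBLen rest + 2
  | '>' :: rest => pvBLen rest + 1
  | _ => 0

def strip_blockquote_prefix_py_alt (line : String) : String × String :=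
  let cs := line.toList
  let pos := pvBLen cs
  (String.mk (cs.take pos), String.mk (cs.drop pos))

-- ===== PRECONDITION & SPEC =====
def Spec_strip_blockquote_prefix_py (line : String) (out : String × String) : Prop := out = strip_blockquote_prefix_py_alt line
instance (line : String) (out : String × String) : Decidable (Spec_strip_blockquote_prefix_py line out) := by unfold Spec_strip_blockquote_prefix_py; infer_instance

-- ===== CLAIM (what is proved, stated in full; the proofs are below) =====
def Claim_equal_strip_blockquote_prefix_py : Prop := ∀ (line : String), Dom_strip_blockquote_prefix_py line → Spec_strip_blockquote_prefix_py line (strip_blockquote_prefix_py line)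

-- ===== LEMMAS AND PROOFS =====
theorem pvBLen_gt_nospace (c : Char) (rs : List Char) (hc : c ≠ ' ') :
    pvBLen ('>' :: c :: rs) = pvBLen (c :: rs) + 1 := by
  rw [pvBLen.eq_def]
  split <;> simp_all

theorem pvBLen_notgt (c : Char) (rs : List Char) (hc : c ≠ '>') :
    pvBLen (c :: rs) = 0 := by
  rw [pvBLen.eq_def]
  split <;> simp_all

theorem pvALoop_eq (content pref : List Char) :
    pvALoop pref content = (pref ++ content.take (pvBLen content), content.drop (pvBLen content)) := by
  fun_induction pvALoop pref content with
  | case1 pref rest ih => simp [pvBLen, ih]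
  | case2 pref rest h ih =>
      cases rest with
      | nil => simpa [pvBLen] using ih
      | cons c rs =>
        have hc : c ≠ ' ' := by intro hc; subst hc; exact h rs rfl
        rw [pvBLen_gt_nospace c rs hc]
        simp [ih]
  | case3 pref content h1 h2 =>
      have hz : pvBLen content = 0 := by
        cases content with
        | nil => simp [pvBLen]
        | cons c rs =>
          have hc : c ≠ '>' := by intro hc; subst hc; exact h2 rs rfl
          exact pvBLen_notgt c rs hc
      simp [hz]

-- ===== VERDICT (by name: the statement is the Claim_ definition above) =====
theorem strip_blockquote_prefix_py_spec : Claim_equal_strip_blockquote_prefix_py := by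
  intro line _
  unfold Spec_strip_blockquote_prefix_py strip_blockquote_prefix_py strip_blockquote_prefix_py_alt
  simp [pvALoop_eq]
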